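-- pv_equiv track=rewrite | github.com/mathieupageot/Cupid_data_analysis | get_data.py | get_position
-- ===== SOURCE A (Python) =====
-- def get_position(target_tuple,infos):
--     x_position = y_position = None
--     # Iterate through the nested list to find the target tuple
--     for x, sublist in enumerate(infos):
--         for y, inner_list in enumerate(sublist):
--             if target_tuple == inner_list:
--                 x_position, y_position = x, y
--                 break
--     return x_position, y_position
-- ===== SOURCE B (Python) =====
-- def get_position(target_tuple, infos):
--     # Reverse outer scan with early return: the rightmost sublist containing
--     # target_tuple wins, matching A's keep-last overwrite, without scanning the rest.
--     for x in range(len(infos) - 1, -1, -1):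
--         for y, inner_list in enumerate(infos[x]):
--             if inner_list == target_tuple:
--                 return x, y
--     return None, None
-- ===== Notes on version B (the rewrite author's own statement) =====
-- stated objective: alternative
-- what changed: Replaces A's full forward scan with keep-last overwriting state by a reverse outer traversal that returns immediately at the first (i.e. rightmost) sublist containing the target.
import Mathlib
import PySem

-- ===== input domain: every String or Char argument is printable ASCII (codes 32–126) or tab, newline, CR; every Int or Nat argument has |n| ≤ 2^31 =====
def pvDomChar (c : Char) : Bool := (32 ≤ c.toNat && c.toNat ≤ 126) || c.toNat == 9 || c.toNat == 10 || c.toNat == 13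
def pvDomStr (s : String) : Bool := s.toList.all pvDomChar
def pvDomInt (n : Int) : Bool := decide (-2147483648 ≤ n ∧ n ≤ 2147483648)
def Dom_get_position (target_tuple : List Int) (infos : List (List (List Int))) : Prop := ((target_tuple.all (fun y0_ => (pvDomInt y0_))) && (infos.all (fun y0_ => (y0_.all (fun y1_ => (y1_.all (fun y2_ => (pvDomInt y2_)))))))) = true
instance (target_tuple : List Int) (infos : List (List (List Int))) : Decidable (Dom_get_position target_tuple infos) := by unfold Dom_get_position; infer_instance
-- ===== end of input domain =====

-- B changes the traversal: reverse outer scan with early return instead of A's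
-- full forward scan that keeps overwriting with the latest match (alternative, same cost).

-- ===== PORT A =====
-- inner loop of A: first index y (counting from y0) whose element equals target, else none
def innerFind (t : List Int) (sub : List (List Int)) (y0 : Int) : Option Int :=
  match sub with
  | [] => none
  | h :: r => if t = h then some y0 else innerFind t r (y0 + 1)

-- outer loop of A: scan forward, overwriting the state at every sublist that contains t
def aLoop (t : List Int) (st : Option Int × Option Int) (x : Int)
    (l : List (List (List Int))) : Option Int × Option Int :=
  match l with
  | [] => st
  | s :: r =>
      aLoop t (match innerFind t s 0 with
               | some y => (some x, some y)
               | none => st) (x + 1) r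

def get_position (target_tuple : List Int) (infos : List (List (List Int))) : Option Int × Option Int :=
  aLoop target_tuple (none, none) 0 infos

-- ===== PORT B =====
-- inner loop of B: index of the first element equal to t (Nat index)
def firstHit (t : List Int) (sub : List (List Int)) : Option Nat :=
  match sub with
  | [] => none
  | h :: r => if h = t then some 0 else (firstHit t r).map (· + 1)

-- B's range(len-1, -1, -1): bLoop k examines indices k-1, k-2, …, 0 and returns at the first hit
def bLoop (t : List Int) (infos : List (List (List Int))) : Nat → Option Int × Option Int
  | 0 => (none, none)
  | k + 1 =>
      match firstHit t (infos.getD k []) with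
      | some y => (some (k : Int), some (y : Int))
      | none => bLoop t infos k

def get_position_alt (target_tuple : List Int) (infos : List (List (List Int))) : Option Int × Option Int :=
  bLoop target_tuple infos infos.length

-- ===== PRECONDITION & SPEC =====
def Spec_get_position (target_tuple : List Int) (infos : List (List (List Int))) (out : Option Int × Option Int) : Prop := out = get_position_alt target_tuple infos
instance (target_tuple : List Int) (infos : List (List (List Int))) (out : Option Int × Option Int) : Decidable (Spec_get_position target_tuple infos out) := by unfold Spec_get_position; infer_instance

-- ===== CLAIM (what is proved, stated in full; the proofs are below) =====
def Claim_equal_get_position : Prop := ∀ (target_tuple : List Int) (infos : List (List (List Int))), Dom_get_position target_tuple infos → Spec_get_position target_tuple infos (get_position target_tuple infos)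

-- ===== LEMMAS AND PROOFS =====

-- rightmost sublist containing t, with (its index, inner index of the first hit)
def lastFind (t : List Int) : List (List (List Int)) → Option (Nat × Nat)
  | [] => none
  | s :: r =>
      match lastFind t r with
      | some (i, y) => some (i + 1, y)
      | none => (firstHit t s).map (fun y => (0, y))

theorem innerFind_eq (t : List Int) (s : List (List Int)) (y0 : Int) :
    innerFind t s y0 = (firstHit t s).map (fun n => y0 + (n : Int)) := by
  induction s generalizing y0 with
  | nil => rfl
  | cons h r ih =>
      simp only [innerFind, firstHit]
      by_cases hh : t = h
      · simp [hh]
      · have : ¬ h = t := fun e => hh e.symm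
        simp [hh, this, ih, Function.comp]
        cases firstHit t r <;> simp
        omega

theorem aLoop_eq (t : List Int) (l : List (List (List Int))) :
    ∀ (st : Option Int × Option Int) (x : Int),
    aLoop t st x l =
      match lastFind t l with
      | some (i, y) => (some (x + (i : Int)), some (y : Int))
      | none => st := by
  induction l with
  | nil => intro st x; rfl
  | cons s r ih =>
      intro st x
      simp only [aLoop, lastFind, ih]
      cases hr : lastFind t r with
      | some p =>
          obtain ⟨i, y⟩ := p
          simp only []
          congr 1
          push_cast; ring_nf
      | none =>
          simp only [innerFind_eq]
          cases hs : firstHit t s <;> simp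

theorem bLoop_stable (t : List Int) (l : List (List (List Int))) (a : List (List Int)) :
    ∀ k, k ≤ l.length → bLoop t (l ++ [a]) k = bLoop t l k := by
  intro k
  induction k with
  | zero => intro _; rfl
  | succ k ih =>
      intro hk
      have hk' : k < l.length := hk
      simp only [bLoop, ih (Nat.le_of_lt hk')]
      have : (l ++ [a]).getD k [] = l.getD k [] := by
        simp [List.getD, List.getElem?_append_left hk']
      rw [this]

theorem lastFind_append (t : List Int) (l : List (List (List Int))) (a : List (List Int)) :
    lastFind t (l ++ [a]) =
      match firstHit t a with
      | some y => some (l.length, y)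
      | none => lastFind t l := by
  induction l with
  | nil =>
      simp only [List.nil_append, lastFind]
      cases firstHit t a <;> rfl
  | cons s r ih =>
      simp only [List.cons_append, lastFind, ih]
      cases firstHit t a with
      | some y => rfl
      | none => cases lastFind t r with
        | some p => obtain ⟨i, yy⟩ := p; rfl
        | none => rfl

theorem bLoop_eq (t : List Int) (l : List (List (List Int))) :
    bLoop t l l.length =
      match lastFind t l with
      | some (i, y) => (some (i : Int), some (y : Int))
      | none => (none, none) := by
  induction l using List.reverseRecOn with
  | nil => rfl
  | append_singleton l a ih =>
      have hlen : (l ++ [a]).length = l.length + 1 := by simp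
      rw [hlen]
      simp only [bLoop, lastFind_append]
      have hget : (l ++ [a]).getD l.length [] = a := by
        simp [List.getD]
      rw [hget]
      cases firstHit t a with
      | some y => rfl
      | none => rw [bLoop_stable t l a l.length (le_refl _), ih]

-- ===== VERDICT (by name: the statement is the Claim_ definition above) =====
theorem get_position_spec : Claim_equal_get_position := by
  intro t infos _
  show get_position t infos = get_position_alt t infos
  unfold get_position get_position_alt
  rw [aLoop_eq, bLoop_eq]
  cases h : lastFind t infos with
  | some p => obtain ⟨i, y⟩ := p; simp
  | none => rfl
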